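-- pv_equiv track=rewrite | github.com/flatsurf/surface-dynamics | surface_dynamics/misc/generalized_multiple_zeta_values.py | clean_term
-- ===== SOURCE A (Python) =====
-- def clean_term(n, den_tuple):
--     D = {}
--     for den, p in den_tuple:
--         if den in D:
--             D[den] += p
--             if not D[den]:
--                 del D[den]
--         else:
--             D[den] = p
--     return tuple(sorted(D.items()))
-- ===== SOURCE B (Python) =====
-- def clean_term(n, den_tuple):
--     pairs = sorted(den_tuple)
--     if not pairs:
--         return ()
--     out = []
--     d, acc = pairs[0]
--     for den, p in pairs[1:]:
--         if den == d:
--             acc += p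
--         else:
--             if acc:
--                 out.append((d, acc))
--             d, acc = den, p
--     if acc:
--         out.append((d, acc))
--     return tuple(out)
-- ===== Notes on version B (the rewrite author's own statement) =====
-- stated objective: idiomatic
-- what changed: Replaces A's hash-map aggregation (insert, accumulate, delete-on-zero, then sort the dict items) with a sort-then-scan: sort the pairs once, sum adjacent runs of equal denominators, emit (den, total) unless the total is zero, so no dict is maintained and the output is built already in order.
-- intended difference: On inputs where some denominator's powers sum to 0 but with an odd parity of trailing zero powers (or an all-zero power list of odd length), A's delete-then-reinsert dict accidentally keeps a (den, 0) entry in its result while B drops every zero-total denominator, which is the intended cleaning (A's own 'del' shows zero totals are meant to be removed). — e.g. on clean_term(0, [(1, 0)]): A returns [(1, 0)], B returns []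
import Mathlib
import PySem

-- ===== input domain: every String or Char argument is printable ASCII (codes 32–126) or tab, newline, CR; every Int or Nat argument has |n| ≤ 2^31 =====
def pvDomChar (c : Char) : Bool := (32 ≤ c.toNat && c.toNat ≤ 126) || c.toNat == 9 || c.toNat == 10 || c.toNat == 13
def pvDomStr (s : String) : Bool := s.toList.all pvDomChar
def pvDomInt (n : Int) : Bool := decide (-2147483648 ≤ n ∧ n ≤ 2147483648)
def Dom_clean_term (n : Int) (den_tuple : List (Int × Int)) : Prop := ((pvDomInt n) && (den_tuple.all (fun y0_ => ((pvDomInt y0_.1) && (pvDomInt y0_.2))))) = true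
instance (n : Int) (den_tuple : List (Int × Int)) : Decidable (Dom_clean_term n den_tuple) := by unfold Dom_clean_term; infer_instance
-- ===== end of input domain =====

-- B replaces A's hash-map aggregation (insert/accumulate/delete-on-zero) by sort-then-scan:
-- sort the pairs, sum adjacent runs of equal denominators, skip zero totals (objective: idiomatic;
-- on the corner inputs described at D_clean_term below, B intentionally drops (den, 0) entries A keeps).

-- ===== PORT A =====
-- the loop body: if den in D: D[den] += p; if not D[den]: del D[den]  else: D[den] = p
def pvBody (D : PySem.Dict Int Int) (q : Int × Int) : PySem.Dict Int Int :=
  if D.contains q.1 then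
    let D' := D.modify q.1 0 (· + q.2)
    if D'.getD q.1 0 = 0 then D'.erase q.1 else D'
  else D.insert q.1 q.2

def clean_term (n : Int) (den_tuple : List (Int × Int)) : List (Int × Int) :=
  let D := den_tuple.foldl pvBody PySem.Dict.empty
  PySem.List.sorted2 D.items (fun p => p.1) (fun p => p.2)

-- ===== PORT B =====
-- itertools.groupby over the sorted list: merge adjacent pairs with equal den, emit a
-- finished group's (den, total) unless the total is 0.
def bGroupsGo (d acc : Int) : List (Int × Int) → List (Int × Int)
  | [] => if acc = 0 then [] else [(d, acc)]
  | q :: rest =>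
    if q.1 = d then bGroupsGo d (acc + q.2) rest
    else if acc = 0 then bGroupsGo q.1 q.2 rest else (d, acc) :: bGroupsGo q.1 q.2 rest

def bGroups : List (Int × Int) → List (Int × Int)
  | [] => []
  | q :: rest => bGroupsGo q.1 q.2 rest

def clean_term_alt (n : Int) (den_tuple : List (Int × Int)) : List (Int × Int) :=
  bGroups (PySem.List.sorted2 den_tuple (fun p => p.1) (fun p => p.2))

-- ===== PRECONDITION & SPEC =====
-- helpers for D_: the powers of one den in order, and the count of its trailing zeros
def pvPs (den : Int) (dt : List (Int × Int)) : List Int :=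
  (dt.filter (fun q => q.1 == den)).map (fun q => q.2)
def pvTrail (ps : List Int) : Nat := (ps.reverse.takeWhile (fun p => p == 0)).length
def pvWrong (ps : List Int) : Bool :=
  ps.sum == 0 && !ps.isEmpty &&
    (if ps.all (fun p => p == 0) then ps.length % 2 == 1 else pvTrail ps % 2 == 1)

-- On inputs where some den's powers sum to 0 but with an odd parity of trailing zero prefix-sums
-- (odd count of trailing zero powers, or an all-zero run of odd length), A's delete-then-reinsert
-- dict accidentally keeps a (den, 0) entry; B drops every zero-total den, which is the intent
-- (the code's own del shows zero totals are to be cleaned away).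
def D_clean_term (n : Int) (den_tuple : List (Int × Int)) : Prop :=
  (den_tuple.any (fun q => pvWrong (pvPs q.1 den_tuple))) = true
instance (n : Int) (den_tuple : List (Int × Int)) : Decidable (D_clean_term n den_tuple) := by
  unfold D_clean_term; infer_instance

def Spec_clean_term (n : Int) (den_tuple : List (Int × Int)) (out : List (Int × Int)) : Prop :=
  ¬ D_clean_term n den_tuple → out = clean_term_alt n den_tuple
instance (n : Int) (den_tuple : List (Int × Int)) (out : List (Int × Int)) : Decidable (Spec_clean_term n den_tuple out) := by
  unfold Spec_clean_term; infer_instance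

def pvDiffWitness_clean_term : Int × (List (Int × Int)) := (0, [(1, 0)])
def pvDiffWitnessOut_clean_term : (List (Int × Int)) × (List (Int × Int)) := ([(1, 0)], [])

-- ===== CLAIM (what is proved, stated in full; the proofs are below) =====
def Claim_unchanged_clean_term : Prop := ∀ (n : Int) (den_tuple : List (Int × Int)), Dom_clean_term n den_tuple → Spec_clean_term n den_tuple (clean_term n den_tuple)
def Claim_changed_clean_term : Prop := Dom_clean_term (pvDiffWitness_clean_term.1) (pvDiffWitness_clean_term.2) ∧ D_clean_term (pvDiffWitness_clean_term.1) (pvDiffWitness_clean_term.2) ∧ clean_term (pvDiffWitness_clean_term.1) (pvDiffWitness_clean_term.2) = pvDiffWitnessOut_clean_term.1 ∧ clean_term_alt (pvDiffWitness_clean_term.1) (pvDiffWitness_clean_term.2) = pvDiffWitnessOut_clean_term.2 ∧ pvDiffWitnessOut_clean_term.1 ≠ pvDiffWitnessOut_clean_term.2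
def Claim_exact_clean_term : Prop := ∀ (n : Int) (den_tuple : List (Int × Int)), Dom_clean_term n den_tuple → D_clean_term n den_tuple → clean_term n den_tuple ≠ clean_term_alt n den_tuple

-- ===== LEMMAS AND PROOFS =====

-- A's per-den automaton: the value of D[den] (none = absent) after one more power
def pvStep (st : Option Int) (p : Int) : Option Int :=
  match st with
  | none => some p
  | some v => if v + p = 0 then none else some (v + p)

theorem get?_erase (d : PySem.Dict Int Int) (k k' : Int) :
    (d.erase k).get? k' = if k' = k then none else d.get? k' := by
  simp only [PySem.Dict.erase, PySem.Dict.get?]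
  induction d.items with
  | nil => simp
  | cons q rest ih =>
    by_cases h1 : q.1 = k <;> by_cases h2 : k' = k <;> by_cases h3 : q.1 = k' <;>
      simp_all [List.filter_cons, List.find?_cons]

theorem pvPs_cons (den : Int) (q : Int × Int) (dt : List (Int × Int)) :
    pvPs den (q :: dt) = if q.1 = den then q.2 :: pvPs den dt else pvPs den dt := by
  by_cases h : q.1 = den <;> simp [pvPs, List.filter_cons, h]

theorem body_get? (D0 : PySem.Dict Int Int) (q : Int × Int) (den : Int) :
    (pvBody D0 q).get? den = if q.1 = den then pvStep (D0.get? den) q.2 else D0.get? den := by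
  unfold pvBody
  by_cases hc : D0.contains q.1
  · have hv : ∃ v, D0.get? q.1 = some v := by
      rw [PySem.Dict.contains_eq_isSome_get?] at hc
      exact Option.isSome_iff_exists.mp hc
    obtain ⟨v, hv⟩ := hv
    simp only [hc, if_true]
    by_cases hd : q.1 = den
    · subst hd
      simp only [PySem.Dict.modify, PySem.Dict.getD, PySem.Dict.get?_insert_self, hv,
        Option.getD_some, if_true]
      by_cases hz : v + q.2 = 0
      · simp [hz, get?_erase, pvStep, hv]
      · simp [hz, pvStep, hv]
    · have hne : den ≠ q.1 := fun h => hd h.symm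
      simp only [PySem.Dict.modify, PySem.Dict.getD, PySem.Dict.get?_insert_self, hv,
        Option.getD_some, hd, if_false]
      by_cases hz : v + q.2 = 0
      · simp [hz, get?_erase, hne, PySem.Dict.get?_insert_of_ne _ _ hne]
      · simp [hz, PySem.Dict.get?_insert_of_ne _ _ hne]
  · have hn : D0.get? q.1 = none := by
      rw [PySem.Dict.contains_eq_isSome_get?] at hc
      cases h : D0.get? q.1 with
      | none => rfl
      | some v => rw [h] at hc; simp at hc
    simp only [hc, if_false]
    by_cases hd : q.1 = den
    · subst hd; simp [PySem.Dict.get?_insert_self, hn, pvStep]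
    · have hne : den ≠ q.1 := fun h => hd h.symm
      simp [PySem.Dict.get?_insert_of_ne _ _ hne, hd]

-- dict invariant: after the loop, D[den] is the automaton run over den's powers
theorem loop_get? (dt : List (Int × Int)) (D0 : PySem.Dict Int Int) (den : Int) :
    (dt.foldl pvBody D0).get? den = (pvPs den dt).foldl pvStep (D0.get? den) := by
  induction dt generalizing D0 with
  | nil => simp [pvPs]
  | cons q rest ih =>
    rw [List.foldl_cons, ih, pvPs_cons, body_get?]
    by_cases h : q.1 = den <;> simp [h]

theorem keys_insert_nodup (d : PySem.Dict Int Int) (k v : Int) (h : d.keys.Nodup) :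
    (d.insert k v).keys.Nodup := by
  by_cases hc : d.contains k
  · have hk : (d.insert k v).keys = d.keys := by
      simp only [PySem.Dict.keys, PySem.Dict.items_insert, hc, if_true, List.map_map]
      refine List.map_congr_left (fun p hp => ?_)
      by_cases hpk : p.1 = k <;> simp [hpk]
    rw [hk]; exact h
  · have hk : (d.insert k v).keys = d.keys ++ [k] := by
      simp [PySem.Dict.keys, PySem.Dict.items_insert, hc]
    have hmem : k ∉ d.keys := by
      rw [PySem.Dict.contains_eq_decide_mem_keys] at hc
      simpa using hc
    rw [hk]
    refine List.Nodup.append h (List.nodup_singleton k) ?_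
    intro a ha hb
    rw [List.mem_singleton] at hb
    subst hb
    exact hmem ha

theorem keys_erase_nodup (d : PySem.Dict Int Int) (k : Int) (h : d.keys.Nodup) :
    (d.erase k).keys.Nodup := by
  have hsub : (d.erase k).keys.Sublist d.keys := by
    simp only [PySem.Dict.keys, PySem.Dict.erase]
    exact List.Sublist.map Prod.fst List.filter_sublist
  exact h.sublist hsub

theorem body_nodup (D0 : PySem.Dict Int Int) (q : Int × Int) (h : D0.keys.Nodup) :
    (pvBody D0 q).keys.Nodup := by
  unfold pvBody
  by_cases hc : D0.contains q.1 <;> simp only [hc, if_true, if_false]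
  · have h1 : (D0.modify q.1 0 (· + q.2)).keys.Nodup := by
      simp only [PySem.Dict.modify]; exact keys_insert_nodup _ _ _ h
    by_cases hz : (D0.modify q.1 0 (· + q.2)).getD q.1 0 = 0 <;> simp only [hz, if_true, if_false]
    · exact keys_erase_nodup _ _ h1
    · exact h1
  · exact keys_insert_nodup _ _ _ h

theorem nodup_keys_loop (dt : List (Int × Int)) (D0 : PySem.Dict Int Int)
    (h : D0.keys.Nodup) : (dt.foldl pvBody D0).keys.Nodup := by
  induction dt generalizing D0 with
  | nil => exact h
  | cons q rest ih => exact ih _ (body_nodup _ _ h)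

-- automaton value: when present, the value is the running sum; when absent, the sum is 0
theorem auto_value (ps : List Int) :
    (match ps.foldl pvStep none with
     | none => ps.sum = 0
     | some v => v = ps.sum) := by
  induction ps using List.reverseRecOn with
  | nil => simp
  | append_singleton ps p ih =>
    rw [List.foldl_append]
    cases h : ps.foldl pvStep none with
    | none =>
      rw [h] at ih; simp only [h, List.foldl_cons, List.foldl_nil, pvStep]
      simp [List.sum_append, ih]
    | some v =>
      rw [h] at ih
      simp only [List.foldl_cons, List.foldl_nil, pvStep]
      by_cases hz : v + p = 0
      · rw [if_pos hz]; simp [List.sum_append]; omega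
      · rw [if_neg hz]; simp [List.sum_append]; omega

-- automaton presence = closed form (sum ≠ 0, or the pvWrong parity corner)
theorem pvTrail_append (ps : List Int) (p : Int) :
    pvTrail (ps ++ [p]) = if p = 0 then pvTrail ps + 1 else 0 := by
  by_cases h : p = 0 <;> simp [pvTrail, List.takeWhile_cons, h]

theorem auto_pres (ps : List Int) :
    (ps.foldl pvStep none).isSome = (decide (ps.sum ≠ 0) || pvWrong ps) := by
  induction ps using List.reverseRecOn with
  | nil => simp [pvWrong]
  | append_singleton ps p ih =>
    have hval := auto_value ps
    rw [List.foldl_append]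
    by_cases hz : ps.sum + p = 0
    · cases h : ps.foldl pvStep none with
      | none =>
        rw [h] at hval
        rw [h] at ih
        have hp : p = 0 := by omega
        have hW : pvWrong ps = false := by
          rcases Bool.or_eq_false_iff.mp ih.symm with ⟨_, hW⟩
          exact hW
        simp only [List.foldl_cons, List.foldl_nil, pvStep, Option.isSome_some]
        by_cases hall : ps.all (fun x => x == 0)
        · have hlen : ps.length % 2 = 0 := by
            by_cases he : ps = []
            · simp [he]
            · simp only [pvWrong, hval] at hW
              simp [hall, he] at hW
              omega
          simp [pvWrong, List.sum_append, hz, hall, hp, pvTrail_append, List.all_append]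
          omega
        · have htr : pvTrail ps % 2 = 0 := by
            have he : ps ≠ [] := by intro hcon; simp [hcon] at hall
            simp only [pvWrong, hval] at hW
            simp [hall, he] at hW
            omega
          simp [pvWrong, List.sum_append, hz, hall, hp, pvTrail_append, List.all_append]
          omega
      | some v =>
        rw [h] at hval
        rw [h] at ih
        have hvz : v + p = 0 := by omega
        simp only [List.foldl_cons, List.foldl_nil, pvStep, hvz, if_pos]
        have hRHS : pvWrong (ps ++ [p]) = false := by
          by_cases hp : p = 0
          · have hs0 : ps.sum = 0 := by omega
            have hW : pvWrong ps = true := by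
              have := ih.symm
              simp [hs0] at this
              exact this
            have he : ps ≠ [] := by
              intro hcon; simp [hcon, pvWrong] at hW
            by_cases hall : ps.all (fun x => x == 0)
            · have hlen : ps.length % 2 = 1 := by
                simp only [pvWrong, hs0] at hW
                simp [hall, he] at hW
                omega
              simp [pvWrong, List.sum_append, hz, hall, hp, pvTrail_append, List.all_append]
              omega
            · have htr : pvTrail ps % 2 = 1 := by
                simp only [pvWrong, hs0] at hW
                simp [hall, he] at hW
                omega
              simp [pvWrong, List.sum_append, hz, hall, hp, pvTrail_append, List.all_append]
              omega
          · simp [pvWrong, List.sum_append, hz, hp, pvTrail_append, List.all_append]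
        simp [hRHS, List.sum_append, hz]
    · have hRHS : (decide ((ps ++ [p]).sum ≠ 0) || pvWrong (ps ++ [p])) = true := by
        simp [List.sum_append, hz]
      rw [hRHS]
      cases h : ps.foldl pvStep none with
      | none => simp [pvStep]
      | some v =>
        rw [h] at hval
        have : v + p ≠ 0 := by omega
        simp [pvStep, this]

-- sorted2 on pairs is sorted under the lexicographic key
theorem sorted2_eq_sorted_lex (xs : List (Int × Int)) :
    PySem.List.sorted2 xs (fun p => p.1) (fun p => p.2)
      = PySem.List.sorted xs (fun p => toLex p : Int × Int → Lex (Int × Int)) := by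
  simp only [PySem.List.sorted2, PySem.List.sorted, Bool.false_eq_true, if_false]
  congr 1
  funext acc x
  congr 1
  funext a b
  rcases lt_trichotomy a.1 b.1 with h | h | h
  · simp [Prod.Lex.toLex_lt_toLex, h]
  · simp [Prod.Lex.toLex_lt_toLex, h, lt_irrefl]
  · simp [Prod.Lex.toLex_lt_toLex, h, lt_asymm h, (h.ne' : a.1 ≠ b.1)]

theorem pvPs_eq_nil_of (den : Int) (l : List (Int × Int)) (h : ∀ x ∈ l, x.1 ≠ den) :
    pvPs den l = [] := by
  simp only [pvPs, List.map_eq_nil_iff, List.filter_eq_nil_iff]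
  intro x hx
  simpa using h x hx

theorem bGroupsGo_fst_mem (l : List (Int × Int)) : ∀ (d a : Int) (p : Int × Int),
    p ∈ bGroupsGo d a l → p.1 = d ∨ p.1 ∈ l.map Prod.fst := by
  induction l with
  | nil =>
    intro d a p hp
    by_cases ha : a = 0 <;> simp [bGroupsGo, ha] at hp
    subst hp; left; rfl
  | cons q rest ih =>
    intro d a p hp
    rw [bGroupsGo] at hp
    by_cases h1 : q.1 = d
    · rw [if_pos h1] at hp
      rcases ih d (a + q.2) p hp with h | h
      · exact Or.inl h
      · exact Or.inr (by simp [h])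
    · rw [if_neg h1] at hp
      by_cases ha : a = 0
      · rw [if_pos ha] at hp
        rcases ih q.1 q.2 p hp with h | h
        · exact Or.inr (by simp [h])
        · exact Or.inr (by simp [h])
      · rw [if_neg ha] at hp
        rcases List.mem_cons.mp hp with h | h
        · subst h; exact Or.inl rfl
        · rcases ih q.1 q.2 p h with h' | h'
          · exact Or.inr (by simp [h'])
          · exact Or.inr (by simp [h'])

theorem bGroupsGo_snd_ne (l : List (Int × Int)) : ∀ (d a : Int) (p : Int × Int),
    p ∈ bGroupsGo d a l → p.2 ≠ 0 := by
  induction l with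
  | nil =>
    intro d a p hp
    by_cases ha : a = 0 <;> simp [bGroupsGo, ha] at hp
    subst hp; exact ha
  | cons q rest ih =>
    intro d a p hp
    rw [bGroupsGo] at hp
    by_cases h1 : q.1 = d
    · rw [if_pos h1] at hp; exact ih _ _ _ hp
    · rw [if_neg h1] at hp
      by_cases ha : a = 0
      · rw [if_pos ha] at hp; exact ih _ _ _ hp
      · rw [if_neg ha] at hp
        rcases List.mem_cons.mp hp with h | h
        · subst h; exact ha
        · exact ih _ _ _ h

theorem bGroupsGo_mem (l : List (Int × Int)) : ∀ (d a : Int) (p : Int × Int),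
    l.Pairwise (fun x y => x.1 ≤ y.1) → (∀ x ∈ l, d ≤ x.1) →
    (p ∈ bGroupsGo d a l ↔
      ((p.1 = d ∧ p.2 = a + (pvPs d l).sum ∧ p.2 ≠ 0) ∨
       (p.1 ≠ d ∧ p.1 ∈ l.map Prod.fst ∧ p.2 = (pvPs p.1 l).sum ∧ p.2 ≠ 0))) := by
  induction l with
  | nil =>
    intro d a p _ _
    constructor
    · intro h
      by_cases ha : a = 0
      · simp [bGroupsGo, ha] at h
      · simp only [bGroupsGo, if_neg ha, List.mem_singleton] at h
        subst h
        exact Or.inl ⟨rfl, by simp [pvPs], ha⟩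
    · rintro (⟨e1, e2, e3⟩ | ⟨_, e2, _⟩)
      · simp only [pvPs, List.filter_nil, List.map_nil, List.sum_nil, add_zero] at e2
        have ha : a ≠ 0 := fun h => e3 (by rw [e2, h])
        simp only [bGroupsGo, if_neg ha, List.mem_singleton]
        exact Prod.ext_iff.mpr ⟨e1, e2⟩
      · simp at e2
  | cons q rest ih =>
    intro d a p hp hd
    obtain ⟨hq1, hp'⟩ := List.pairwise_cons.mp hp
    have hdq : d ≤ q.1 := hd q (List.mem_cons_self)
    have hdr : ∀ x ∈ rest, d ≤ x.1 := fun x hx => hd x (List.mem_cons_of_mem _ hx)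
    rw [bGroupsGo]
    by_cases h1 : q.1 = d
    · rw [if_pos h1, ih d (a + q.2) p hp' hdr]
      have hps : pvPs d (q :: rest) = q.2 :: pvPs d rest := by
        rw [pvPs_cons, if_pos h1]
      constructor
      · rintro (⟨e1, e2, e3⟩ | ⟨e1, e2, e3, e4⟩)
        · exact Or.inl ⟨e1, by rw [hps]; simp; omega, e3⟩
        · refine Or.inr ⟨e1, by simp [h1] at e2 ⊢; tauto, ?_, e4⟩
          rw [pvPs_cons, if_neg (by rw [h1]; exact fun h => e1 h.symm)]
          exact e3
      · rintro (⟨e1, e2, e3⟩ | ⟨e1, e2, e3, e4⟩)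
        · refine Or.inl ⟨e1, ?_, e3⟩
          rw [hps] at e2; simp at e2; omega
        · refine Or.inr ⟨e1, ?_, ?_, e4⟩
          · simp at e2; rcases e2 with e2 | e2
            · exact absurd (e2.trans h1) e1
            · simpa using e2
          · rw [pvPs_cons, if_neg (by rw [h1]; exact fun h => e1 h.symm)] at e3
            exact e3
    · have hdq' : d < q.1 := lt_of_le_of_ne hdq (fun h => h1 h.symm)
      have hdrest : ∀ x ∈ rest, d < x.1 := fun x hx => lt_of_lt_of_le hdq' (hq1 x hx)
      have hpsd : pvPs d (q :: rest) = [] :=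
        pvPs_eq_nil_of _ _ (by
          intro x hx
          rcases List.mem_cons.mp hx with h | h
          · subst h; exact h1
          · exact ne_of_gt (hdrest x h))
      have hmain : p ∈ bGroupsGo q.1 q.2 rest ↔
          (p.1 ≠ d ∧ p.1 ∈ (q :: rest).map Prod.fst ∧ p.2 = (pvPs p.1 (q :: rest)).sum ∧ p.2 ≠ 0) := by
        rw [ih q.1 q.2 p hp' hq1]
        constructor
        · rintro (⟨e1, e2, e3⟩ | ⟨e1, e2, e3, e4⟩)
          · refine ⟨by rw [e1]; exact fun h => h1 h, by simp [e1], ?_, e3⟩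
            rw [e1, pvPs_cons, if_pos rfl]; simp; omega
          · have hne : p.1 ≠ d := by
              simp only [List.mem_map] at e2
              obtain ⟨x, hx, hx1⟩ := e2
              exact ne_of_gt (hx1 ▸ hdrest x hx)
            refine ⟨hne, by simp; right; simpa using e2, ?_, e4⟩
            rw [pvPs_cons, if_neg (by intro h; exact e1 h.symm)]
            exact e3
        · rintro ⟨e1, e2, e3, e4⟩
          by_cases hq : p.1 = q.1
          · refine Or.inl ⟨hq, ?_, e4⟩
            rw [hq, pvPs_cons, if_pos rfl] at e3; simp at e3; omega
          · refine Or.inr ⟨hq, ?_, ?_, e4⟩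
            · simp at e2; rcases e2 with e2 | e2
              · exact absurd e2 hq
              · simpa using e2
            · have hq' : ¬q.1 = p.1 := by intro h; exact hq h.symm
              rw [pvPs_cons, if_neg hq'] at e3
              exact e3
      rw [if_neg h1]
      by_cases ha : a = 0
      · rw [if_pos ha, hmain]
        constructor
        · intro h; exact Or.inr h
        · rintro (⟨e1, e2, e3⟩ | h)
          · rw [hpsd] at e2; simp at e2
            exact absurd (e2.trans ha) e3
          · exact h
      · rw [if_neg ha]
        rw [List.mem_cons, hmain]
        constructor
        · rintro (h | ⟨e1, e2, e3, e4⟩)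
          · subst h
            exact Or.inl ⟨rfl, by rw [hpsd]; simp, ha⟩
          · exact Or.inr ⟨e1, e2, e3, e4⟩
        · rintro (⟨e1, e2, e3⟩ | h)
          · left
            rw [hpsd] at e2; simp at e2
            exact Prod.ext_iff.mpr ⟨e1, e2⟩
          · exact Or.inr h

theorem bGroups_mem (l : List (Int × Int)) (hs : l.Pairwise (fun a b => a.1 ≤ b.1)) (p : Int × Int) :
    p ∈ bGroups l ↔ (p.1 ∈ l.map Prod.fst ∧ p.2 = (pvPs p.1 l).sum ∧ p.2 ≠ 0) := by
  cases l with
  | nil => simp [bGroups]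
  | cons q rest =>
    obtain ⟨hq1, hp'⟩ := List.pairwise_cons.mp hs
    rw [show bGroups (q :: rest) = bGroupsGo q.1 q.2 rest from rfl]
    rw [bGroupsGo_mem rest q.1 q.2 p hp' hq1]
    constructor
    · rintro (⟨e1, e2, e3⟩ | ⟨e1, e2, e3, e4⟩)
      · refine ⟨by simp [e1], ?_, e3⟩
        rw [e1, pvPs_cons, if_pos rfl]; simp; omega
      · refine ⟨by simp; right; simpa using e2, ?_, e4⟩
        rw [pvPs_cons, if_neg (by intro h; exact e1 h.symm)]
        exact e3
    · rintro ⟨e1, e2, e3⟩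
      by_cases hq : p.1 = q.1
      · refine Or.inl ⟨hq, ?_, e3⟩
        rw [hq, pvPs_cons, if_pos rfl] at e2; simp at e2; omega
      · refine Or.inr ⟨hq, ?_, ?_, e3⟩
        · simp at e1; rcases e1 with e1 | e1
          · exact absurd e1 hq
          · simpa using e1
        · have hq' : ¬q.1 = p.1 := by intro h; exact hq h.symm
          rw [pvPs_cons, if_neg hq'] at e2
          exact e2

theorem bGroupsGo_pairwise (l : List (Int × Int)) : ∀ (d a : Int),
    l.Pairwise (fun x y => x.1 ≤ y.1) → (∀ x ∈ l, d ≤ x.1) →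
    (bGroupsGo d a l).Pairwise (fun x y => x.1 < y.1) := by
  induction l with
  | nil =>
    intro d a _ _
    by_cases ha : a = 0 <;> simp [bGroupsGo, ha]
  | cons q rest ih =>
    intro d a hp hd
    obtain ⟨hq1, hp'⟩ := List.pairwise_cons.mp hp
    have hdq : d ≤ q.1 := hd q (List.mem_cons_self)
    rw [bGroupsGo]
    by_cases h1 : q.1 = d
    · rw [if_pos h1]
      exact ih d (a + q.2) hp' (fun x hx => hd x (List.mem_cons_of_mem _ hx))
    · have hdq' : d < q.1 := lt_of_le_of_ne hdq (fun h => h1 h.symm)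
      have hrec := ih q.1 q.2 hp' hq1
      rw [if_neg h1]
      by_cases ha : a = 0
      · rw [if_pos ha]; exact hrec
      · rw [if_neg ha]
        refine List.pairwise_cons.mpr ⟨?_, hrec⟩
        intro x hx
        rcases bGroupsGo_fst_mem rest q.1 q.2 x hx with h | h
        · rw [h]; exact hdq'
        · simp only [List.mem_map] at h
          obtain ⟨y, hy, hy1⟩ := h
          exact lt_of_lt_of_le hdq' (hy1 ▸ hq1 y hy)

theorem bGroups_pairwise (l : List (Int × Int)) (hs : l.Pairwise (fun a b => a.1 ≤ b.1)) :
    (bGroups l).Pairwise (fun a b => a.1 < b.1) := by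
  cases l with
  | nil => simp [bGroups]
  | cons q rest =>
    obtain ⟨hq1, hp'⟩ := List.pairwise_cons.mp hs
    exact bGroupsGo_pairwise rest q.1 q.2 hp' hq1

theorem bGroups_snd_ne (l : List (Int × Int)) (p : Int × Int) (h : p ∈ bGroups l) :
    p.2 ≠ 0 := by
  cases l with
  | nil => simp [bGroups] at h
  | cons q rest => exact bGroupsGo_snd_ne rest q.1 q.2 p h

theorem items_mem_iff (dt : List (Int × Int))
    (hnD : ∀ q ∈ dt, pvWrong (pvPs q.1 dt) = false) (p : Int × Int) :
    p ∈ (dt.foldl pvBody PySem.Dict.empty).items ↔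
      (p.1 ∈ dt.map Prod.fst ∧ p.2 = (pvPs p.1 dt).sum ∧ p.2 ≠ 0) := by
  have hkeys : (dt.foldl pvBody PySem.Dict.empty).keys.Nodup :=
    nodup_keys_loop dt _ (by rw [PySem.Dict.keys_empty]; exact List.nodup_nil)
  have hget : (dt.foldl pvBody PySem.Dict.empty).get? p.1 = (pvPs p.1 dt).foldl pvStep none := by
    rw [loop_get?, PySem.Dict.get?_empty]
  constructor
  · intro hmem
    have h2 : (dt.foldl pvBody PySem.Dict.empty).get? p.1 = some p.2 :=
      PySem.Dict.get?_of_mem_items _ hmem hkeys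
    rw [hget] at h2
    have hval := auto_value (pvPs p.1 dt)
    rw [h2] at hval
    have hpres : ((pvPs p.1 dt).foldl pvStep none).isSome = true := by rw [h2]; rfl
    rw [auto_pres] at hpres
    have hne : pvPs p.1 dt ≠ [] := by
      intro h0; rw [h0] at h2; simp at h2
    have hmemf : p.1 ∈ dt.map Prod.fst := by
      simp only [pvPs, ne_eq, List.map_eq_nil_iff, List.filter_eq_nil_iff] at hne
      push Not at hne
      obtain ⟨x, hx, hx1⟩ := hne
      simp only [List.mem_map]
      exact ⟨x, hx, by simpa using hx1⟩
    have hW : pvWrong (pvPs p.1 dt) = false := by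
      simp only [List.mem_map] at hmemf
      obtain ⟨x, hx, hx1⟩ := hmemf
      have := hnD x hx
      rw [hx1] at this
      exact this
    rw [hW, Bool.or_false, decide_eq_true_eq] at hpres
    exact ⟨hmemf, hval, by rw [hval]; exact hpres⟩
  · rintro ⟨h1, h2, h3⟩
    have hW : pvWrong (pvPs p.1 dt) = false := by
      simp only [List.mem_map] at h1
      obtain ⟨x, hx, hx1⟩ := h1
      have := hnD x hx
      rw [hx1] at this
      exact this
    have hsum : (pvPs p.1 dt).sum ≠ 0 := by rw [← h2]; exact h3
    have hpres : ((pvPs p.1 dt).foldl pvStep none).isSome = true := by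
      rw [auto_pres, hW, Bool.or_false, decide_eq_true_eq]; exact hsum
    obtain ⟨v, hv⟩ := Option.isSome_iff_exists.mp hpres
    have hval := auto_value (pvPs p.1 dt)
    rw [hv] at hval
    have : (dt.foldl pvBody PySem.Dict.empty).get? p.1 = some p.2 := by
      rw [hget, hv, hval, ← h2]
    exact PySem.Dict.mem_items_of_get?_eq_some _ this

-- ===== VERDICT (by name: the statement is the Claim_ definition above) =====
theorem clean_term_spec : Claim_unchanged_clean_term := by
  intro n dt _ hnD
  have hforall : ∀ q ∈ dt, pvWrong (pvPs q.1 dt) = false := by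
    intro q hq
    by_contra hW
    refine hnD ?_
    unfold D_clean_term
    rw [List.any_eq_true]
    exact ⟨q, hq, by simpa using hW⟩
  show clean_term n dt = clean_term_alt n dt
  simp only [clean_term, clean_term_alt]
  rw [sorted2_eq_sorted_lex, sorted2_eq_sorted_lex]
  have hSperm : (PySem.List.sorted dt (fun p => (toLex p : Lex (Int × Int)))).Perm dt :=
    PySem.List.sorted_perm dt _ false
  have hSsort : (PySem.List.sorted dt (fun p => (toLex p : Lex (Int × Int)))).Pairwise
      (fun a b => a.1 ≤ b.1) := by
    refine (PySem.List.sorted_pairwise dt _).imp ?_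
    intro a b hab
    rcases Prod.Lex.toLex_le_toLex.mp hab with h | h
    · exact le_of_lt h
    · exact le_of_eq h.1
  have hsum : ∀ den, (pvPs den (PySem.List.sorted dt (fun p => (toLex p : Lex (Int × Int))))).sum
      = (pvPs den dt).sum := by
    intro den
    exact List.Perm.sum_eq ((hSperm.filter _).map _)
  have hmemf : ∀ x : Int, (x ∈ (PySem.List.sorted dt (fun p => (toLex p : Lex (Int × Int)))).map Prod.fst)
      ↔ x ∈ dt.map Prod.fst := fun x => (hSperm.map Prod.fst).mem_iff
  apply PySem.List.sorted_eq_of_perm_of_pairwise_lt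
  · have hnd1 : (bGroups (PySem.List.sorted dt (fun p => (toLex p : Lex (Int × Int))))).Nodup := by
      refine (bGroups_pairwise _ hSsort).imp ?_
      intro a b hlt heq
      rw [heq] at hlt
      exact lt_irrefl _ hlt
    have hnd2 : (dt.foldl pvBody PySem.Dict.empty).items.Nodup := by
      have hkeys : (dt.foldl pvBody PySem.Dict.empty).keys.Nodup :=
        nodup_keys_loop dt _ (by rw [PySem.Dict.keys_empty]; exact List.nodup_nil)
      exact List.Nodup.of_map Prod.fst hkeys
    rw [List.perm_ext_iff_of_nodup hnd1 hnd2]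
    intro p
    rw [bGroups_mem _ hSsort p, items_mem_iff dt hforall p, hsum p.1, hmemf p.1]
  · refine (bGroups_pairwise _ hSsort).imp ?_
    intro a b hlt
    exact Prod.Lex.toLex_lt_toLex.mpr (Or.inl hlt)

theorem clean_term_changed : Claim_changed_clean_term := by
  unfold Claim_changed_clean_term; decide

theorem clean_term_tight : Claim_exact_clean_term := by
  intro n dt _ hD heq
  unfold D_clean_term at hD
  rw [List.any_eq_true] at hD
  obtain ⟨q, hq, hW⟩ := hD
  have hW : pvWrong (pvPs q.1 dt) = true := by simpa using hW
  have hpres : ((pvPs q.1 dt).foldl pvStep none).isSome = true := by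
    rw [auto_pres, hW]; simp
  obtain ⟨v, hv⟩ := Option.isSome_iff_exists.mp hpres
  have hval := auto_value (pvPs q.1 dt)
  rw [hv] at hval
  have hsum0 : (pvPs q.1 dt).sum = 0 := by
    by_contra h
    simp [pvWrong, h] at hW
  have hget : (dt.foldl pvBody PySem.Dict.empty).get? q.1 = some 0 := by
    rw [loop_get?, PySem.Dict.get?_empty, hv, hval, hsum0]
  have hmem : (q.1, (0 : Int)) ∈ (dt.foldl pvBody PySem.Dict.empty).items :=
    PySem.Dict.mem_items_of_get?_eq_some _ hget
  have hmem2 : (q.1, (0 : Int)) ∈ clean_term n dt := by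
    simp only [clean_term]
    exact ((PySem.List.sorted2_perm _ _ _ _).mem_iff).mpr hmem
  rw [heq] at hmem2
  simp only [clean_term_alt] at hmem2
  exact (bGroups_snd_ne _ _ hmem2) rfl
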